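-- pv_equiv track=rewrite | github.com/person142/numba_special | generate_signatures_json.py | determine_fused_args
-- ===== SOURCE A (Python) =====
-- import collections
--
-- def determine_fused_args(specializations):
--     arg_types = collections.defaultdict(list)
--     for args in specializations.keys():
--         for i, arg in enumerate(args):
--             arg_types[i].append(arg)
--     # These args have fused types
--     changing_args = {
--         i: types for i, types in arg_types.items()
--         if types[1:] != types[:-1]
--     }
--     fused_args = []
--     seen_args = set()
--     for i1, types1 in changing_args.items():
--         if i1 in seen_args:
--             continue
--         seen_args.add(i1)
--
--         cluster = {i1}
--         for i2, types2 in changing_args.items():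
--             if types1 == types2:
--                 # These arugments always have the same types, so they
--                 # are the same fused type.
--                 cluster.add(i2)
--                 seen_args.add(i2)
--         fused_args.append(cluster)
--
--     # Return the first occurance of a fused arg for each fused type.
--     return {min(cluster) for cluster in fused_args}
-- ===== SOURCE B (Python) =====
-- def determine_fused_args(specializations):
--     keys = list(specializations)
--     width = max((len(args) for args in keys), default=0)
--     reps = {}
--     for i in range(width):
--         col = tuple(args[i] for args in keys if len(args) > i)
--         if col[1:] != col[:-1]:
--             reps.setdefault(col, i)
--     return set(reps.values())
-- ===== Notes on version B (the rewrite author's own statement) =====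
-- stated objective: alternative
-- what changed: B replaces A's seen-set clustering pass (for each changing argument, rescan all changing arguments to collect equal type-lists, then take the min of each cluster) by a single pass that extracts each argument column directly and records the first index per distinct changing column via dict.setdefault.
import Mathlib
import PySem

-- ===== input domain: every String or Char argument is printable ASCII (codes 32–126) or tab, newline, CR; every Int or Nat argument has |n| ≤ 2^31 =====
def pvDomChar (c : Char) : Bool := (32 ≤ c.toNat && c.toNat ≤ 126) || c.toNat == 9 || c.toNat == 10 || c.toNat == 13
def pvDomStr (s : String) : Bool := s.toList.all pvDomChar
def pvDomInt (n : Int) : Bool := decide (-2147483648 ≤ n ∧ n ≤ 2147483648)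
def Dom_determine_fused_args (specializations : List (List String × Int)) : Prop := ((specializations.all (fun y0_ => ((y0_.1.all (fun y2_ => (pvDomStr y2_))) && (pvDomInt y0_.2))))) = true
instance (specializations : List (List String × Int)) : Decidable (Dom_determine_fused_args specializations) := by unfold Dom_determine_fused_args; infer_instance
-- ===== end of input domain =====

-- B replaces A's seen-set clustering over changing arguments by a single column-extraction
-- pass recording the first index per distinct changing column via dict.setdefault (alternative).


-- ===== PORT A =====
-- arg_types = defaultdict(list); for args in specializations.keys(): for i, arg in enumerate(args): arg_types[i].append(arg)
def pvA_argTypes (keys : List (List String)) : PySem.Dict Int (List String) :=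
  keys.foldl (fun d args =>
      (PySem.List.enumerate args).foldl
        (fun d ia => d.modify ia.1 [] (fun l => l ++ [ia.2])) d)
    PySem.Dict.empty

def determine_fused_args (specializations : List (List String × Int)) : List Int :=
  let arg_types := pvA_argTypes ((PySem.Dict.ofList specializations).keys)
  -- dict comprehension over arg_types.items(); its keys are already distinct, so Dict.mk is exact
  let changing_args : PySem.Dict Int (List String) :=
    PySem.Dict.mk (arg_types.items.filter
      (fun p => PySem.List.slice p.2 (some 1) none ≠ PySem.List.slice p.2 none (some (-1))))
  let loop := changing_args.items.foldl
    (fun (acc : List (PySem.Set Int) × PySem.Set Int) p =>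
      if PySem.Set.contains acc.2 p.1 then acc
      else
        let seen := PySem.Set.add acc.2 p.1
        let cs := changing_args.items.foldl
          (fun (cs : PySem.Set Int × PySem.Set Int) q =>
            if p.2 = q.2 then (PySem.Set.add cs.1 q.1, PySem.Set.add cs.2 q.1) else cs)
          (PySem.Set.add PySem.Set.empty p.1, seen)
        (acc.1 ++ [cs.1], cs.2))
    ([], PySem.Set.empty)
  -- min(cluster): each cluster contains i1, so it is nonempty and the .getD default is never used
  PySem.Set.ofList (loop.1.map (fun c => (PySem.List.min? c (fun x => x)).getD 0))

-- ===== PORT B =====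
-- col = tuple(args[i] for args in keys if len(args) > i)
def pvB_col (keys : List (List String)) (i : Int) : List String :=
  keys.filterMap (fun args => if i < (args.length : Int) then PySem.List.pyGet? args i else none)

def determine_fused_args_alt (specializations : List (List String × Int)) : List Int :=
  let keys := (PySem.Dict.ofList specializations).keys
  let width := PySem.List.maxD (keys.map (fun args => (args.length : Int))) (fun x => x) 0
  let reps := (PySem.List.pyRange 0 width 1).foldl
    (fun (reps : PySem.Dict (List String) Int) i =>
      let col := pvB_col keys i
      if PySem.List.slice col (some 1) none ≠ PySem.List.slice col none (some (-1)) then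
        reps.setdefault col i
      else reps)
    PySem.Dict.empty
  PySem.Set.ofList reps.values

-- ===== PRECONDITION & SPEC =====
def Spec_determine_fused_args (specializations : List (List String × Int)) (out : List Int) : Prop := out = determine_fused_args_alt specializations
instance (specializations : List (List String × Int)) (out : List Int) : Decidable (Spec_determine_fused_args specializations out) := by unfold Spec_determine_fused_args; infer_instance

-- ===== CLAIM (what is proved, stated in full; the proofs are below) =====
def Claim_equal_determine_fused_args : Prop := ∀ (specializations : List (List String × Int)), Dom_determine_fused_args specializations → Spec_determine_fused_args specializations (determine_fused_args specializations)

-- ===== LEMMAS AND PROOFS =====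

-- maximal argument count, realized by A's arg_types dict and by B's width
def pvW (keys : List (List String)) : Nat :=
  keys.foldl (fun m a => max m a.length) 0

theorem pvFoldMaxCast (t : List (List String)) : ∀ (m : Nat),
    ((t.map (fun a => (a.length : Int))).foldl max (m : Int))
      = ((t.foldl (fun m a => max m a.length) m : Nat) : Int) := by
  induction t with
  | nil => intro m; simp
  | cons a t ih =>
      intro m
      simp only [List.map_cons, List.foldl_cons, ← Nat.cast_max, ih]

theorem pvW_alt (keys : List (List String)) :
    PySem.List.maxD (keys.map (fun args => (args.length : Int))) (fun x => x) 0 = (pvW keys : Int) := by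
  cases keys with
  | nil => simp [PySem.List.maxD, PySem.List.max?, pvW]
  | cons a t =>
      simp only [PySem.List.maxD, List.map_cons, PySem.List.max?_id_cons, Option.getD_some, pvW,
        List.foldl_cons, Nat.zero_max, pvFoldMaxCast]

theorem pvRangeDict_get? (m : Nat) (h : Nat → List String) (k : Nat) :
    (PySem.Dict.mk ((List.range m).map (fun (j : Nat) => ((j : Int), h j)))).get? (k : Int)
      = if k < m then some (h k) else none := by
  induction m with
  | zero => simp [PySem.Dict.get?]
  | succ m ih =>
      simp only [PySem.Dict.get?] at *
      simp only [List.range_succ, List.map_append, List.find?_append]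
      simp only [List.map_cons, List.map_nil, List.find?_cons, List.find?_nil]
      rcases h' : List.find? (fun p => p.1 == (k:Int)) ((List.range m).map (fun (j:Nat) => ((j:Int), h j))) with _ | v
      · simp only [h', Option.none_or]
        simp only [h'] at ih
        by_cases he : m = k
        · subst he; simp [Nat.lt_succ_self]
        · have hb : ¬ (((m:Int), h m).1 == (k:Int)) = true := by simp [Int.natCast_inj]; omega
          have hk : ¬ k < m := by
            intro hk; simp [hk] at ih
          simp only [hb]
          rw [if_neg (by omega : ¬ k < m + 1)]
          simp
      · simp only [h', Option.some_or]
        simp only [h'] at ih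
        have hk : k < m := by
          by_contra hk; simp [hk] at ih
        simp only [if_pos hk] at ih
        simp [ih, Nat.lt_succ_of_lt hk]

theorem pvRangeDict_modify (m : Nat) (h : Nat → List String) (k : Nat) (x : String) (hk : k ≤ m) :
    (PySem.Dict.mk ((List.range m).map (fun (j : Nat) => ((j : Int), h j)))).modify (k : Int) [] (fun l => l ++ [x])
      = PySem.Dict.mk ((List.range (max m (k+1))).map (fun (j : Nat) =>
          ((j : Int), if j = k then (if k < m then h k else []) ++ [x] else h j))) := by
  have hg := pvRangeDict_get? m h k
  simp only [PySem.Dict.modify, PySem.Dict.getD_eq_get?_getD, hg, PySem.Dict.insert,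
    PySem.Dict.contains, PySem.Dict.items]
  rcases Nat.lt_or_ge k m with hlt | hge
  · have hany : ((List.range m).map (fun (j:Nat) => ((j:Int), h j))).any (fun p => p.1 == (k:Int)) = true := by
      simp only [List.any_eq_true]
      exact ⟨((k:Int), h k), List.mem_map_of_mem (List.mem_range.mpr hlt), by simp⟩
    simp only [if_pos hlt, hany, if_true, Option.getD_some]
    have hmax : max m (k+1) = m := by omega
    rw [hmax, List.map_map]
    congr 1
    apply List.map_congr_left
    intro j hj
    simp only [Function.comp]
    by_cases hjk : j = k
    · subst hjk; simp [hlt]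
    · have : ¬ (((j:Nat):Int) == (k:Int)) = true := by simp; omega
      simp [this, hjk]
  · have hkm : k = m := by omega
    subst hkm
    have hnot : ¬ k < k := lt_irrefl k
    have hany : ((List.range k).map (fun (j:Nat) => ((j:Int), h j))).any (fun p => p.1 == (k:Int)) = false := by
      simp only [List.any_eq_false]
      intro p hp
      simp only [List.mem_map, List.mem_range] at hp
      obtain ⟨j, hj, rfl⟩ := hp
      simp; omega
    simp only [hnot, if_false, hany, Bool.false_eq_true, Option.getD_none, List.nil_append]
    have hmax : max k (k+1) = k + 1 := by omega
    rw [hmax, List.range_succ, List.map_append]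
    simp only [List.map_cons, List.map_nil, if_pos rfl, if_true, eq_self_iff_true]
    congr 1
    refine congrArg (fun l => l ++ [(((k:Nat):Int), [x])]) ?_
    apply List.map_congr_left
    intro j hj
    simp only [List.mem_range] at hj
    simp [Nat.ne_of_lt hj]

theorem pvInnerFold (a : List String) (n : Nat) (g : Nat → List String) :
    ((PySem.List.enumerate a).foldl (fun d ia => PySem.Dict.modify d ia.1 [] (fun l => l ++ [ia.2]))
       (PySem.Dict.mk ((List.range n).map (fun (j : Nat) => ((j : Int), g j)))))
      = PySem.Dict.mk ((List.range (max n a.length)).map (fun (j : Nat) => ((j : Int),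
          (if j < n then g j else []) ++ (PySem.List.pyGet? a (j : Int)).toList))) := by
  induction a using List.reverseRecOn with
  | nil =>
      simp only [PySem.List.enumerate, List.foldl_nil, List.length_nil, Nat.max_zero]
      congr 1
      apply List.map_congr_left
      intro j hj
      simp only [List.mem_range] at hj
      simp [PySem.List.pyGet?_natCast, hj]
  | append_singleton xs x ih =>
      rw [PySem.List.enumerate_append, List.foldl_append, ih]
      have hstep := pvRangeDict_modify (max n xs.length)
        (fun j => (if j < n then g j else []) ++ (PySem.List.pyGet? xs (j : Int)).toList)
        xs.length x (by omega)
      simp only [PySem.List.enumerate, List.foldl_cons, List.foldl_nil, zero_add] at *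
      rw [hstep]
      have hm : max (max n xs.length) (xs.length + 1) = max n (xs.length + 1) := by omega
      have hl : (xs ++ [x]).length = xs.length + 1 := by simp
      rw [hm, hl]
      congr 1
      apply List.map_congr_left
      intro j hj
      simp only [List.mem_range] at hj
      by_cases hjk : j = xs.length
      · subst hjk
        have hnone : PySem.List.pyGet? xs ((xs.length : Nat) : Int) = none := by
          rw [PySem.List.pyGet?_natCast]; simp
        have hsome : PySem.List.pyGet? (xs ++ [x]) ((xs.length : Nat) : Int) = some x := by
          rw [PySem.List.pyGet?_natCast]; simp
        by_cases hn : xs.length < n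
        · simp [if_pos rfl, hn, hnone, hsome, if_pos (by omega : xs.length < max n xs.length)]
        · simp [if_pos rfl, hn, hnone, hsome, if_neg (by omega : ¬ xs.length < max n xs.length)]
      · have hget : PySem.List.pyGet? (xs ++ [x]) ((j : Nat) : Int) = PySem.List.pyGet? xs ((j : Nat) : Int) := by
          rw [PySem.List.pyGet?_natCast, PySem.List.pyGet?_natCast]
          rcases Nat.lt_or_ge j xs.length with hlt | hge
          · rw [List.getElem?_append_left hlt]
          · rw [List.getElem?_eq_none (by simp; omega), List.getElem?_eq_none (by omega)]
        simp [hjk, hget]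

theorem pvW_append (ks : List (List String)) (a : List String) :
    pvW (ks ++ [a]) = max (pvW ks) a.length := by
  simp [pvW, List.foldl_append]

theorem pvlen_le_pvW (keys : List (List String)) : ∀ args ∈ keys, args.length ≤ pvW keys :=
  (PySem.List.le_foldl_max_nat keys (fun a => a.length) 0).2

theorem pvB_col_nil_of_ge (keys : List (List String)) (j : Nat) (h : ∀ args ∈ keys, args.length ≤ j) :
    pvB_col keys (j : Int) = [] := by
  rw [pvB_col, List.filterMap_eq_nil_iff]
  intro args ha
  rw [if_neg (by have := h args ha; omega : ¬ ((j:Nat):Int) < (args.length : Int))]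

theorem pvB_col_append (ks : List (List String)) (a : List String) (j : Nat) :
    pvB_col (ks ++ [a]) (j : Int) = pvB_col ks (j : Int) ++ (PySem.List.pyGet? a (j : Int)).toList := by
  rw [pvB_col, pvB_col, List.filterMap_append]
  congr 1
  simp only [List.filterMap_cons, List.filterMap_nil]
  rcases Nat.lt_or_ge j a.length with hlt | hge
  · rw [if_pos (by omega : ((j:Nat):Int) < (a.length : Int)), PySem.List.pyGet?_natCast]
    cases a[j]? <;> simp
  · rw [if_neg (by omega : ¬ ((j:Nat):Int) < (a.length : Int)), PySem.List.pyGet?_natCast,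
      List.getElem?_eq_none (by omega)]
    simp

theorem pvA_argTypes_items (keys : List (List String)) :
    (pvA_argTypes keys).items
      = (List.range (pvW keys)).map (fun (j : Nat) => ((j : Int), pvB_col keys (j : Int))) := by
  induction keys using List.reverseRecOn with
  | nil => simp [pvA_argTypes, pvW, PySem.Dict.empty]
  | append_singleton ks a ih =>
      have hmk : pvA_argTypes ks
          = PySem.Dict.mk ((List.range (pvW ks)).map (fun (j : Nat) => ((j : Int), pvB_col ks (j : Int)))) :=
        congrArg PySem.Dict.mk ih
      have hstep : pvA_argTypes (ks ++ [a])
          = (PySem.List.enumerate a).foldl (fun d ia => d.modify ia.1 [] (fun l => l ++ [ia.2]))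
              (pvA_argTypes ks) := by
        simp [pvA_argTypes, List.foldl_append]
      rw [hstep, hmk, pvInnerFold, pvW_append]
      simp only [PySem.Dict.items]
      apply List.map_congr_left
      intro j hj
      simp only [List.mem_range] at hj
      rw [pvB_col_append]
      congr 1
      by_cases hn : j < pvW ks
      · simp [hn]
      · rw [if_neg hn, pvB_col_nil_of_ge]
        intro args ha
        have := pvlen_le_pvW ks args ha
        omega

def pvDedupSnd (S : List (List String)) : List (Int × List String) → List (Int × List String)
  | [] => []
  | p :: r => if p.2 ∈ S then pvDedupSnd S r else p :: pvDedupSnd (p.2 :: S) r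

theorem pvB_fold_items (L : List (Int × List String)) :
    ∀ (d : PySem.Dict (List String) Int) (S : List (List String)),
    (∀ t, d.contains t = true ↔ t ∈ S) →
    ((L.foldl (fun (d : PySem.Dict (List String) Int) p => d.setdefault p.2 p.1) d).items)
      = d.items ++ (pvDedupSnd S L).map (fun p => (p.2, p.1)) := by
  induction L with
  | nil => intro d S _; simp [pvDedupSnd]
  | cons p r ih =>
      intro d S hS
      rw [List.foldl_cons]
      by_cases hmem : p.2 ∈ S
      · rw [show d.setdefault p.2 p.1 = d from by
          simp [PySem.Dict.setdefault, (hS p.2).mpr hmem]]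
        rw [ih d S hS, pvDedupSnd, if_pos hmem]
      · rw [show d.setdefault p.2 p.1 = PySem.Dict.mk (d.items ++ [(p.2, p.1)]) from by
          simp only [PySem.Dict.setdefault]
          rw [if_neg (by rw [hS p.2]; exact hmem)]]
        rw [ih (PySem.Dict.mk (d.items ++ [(p.2, p.1)])) (p.2 :: S) ?_]
        · rw [pvDedupSnd, if_neg hmem]
          simp [List.append_assoc]
        · intro t
          simp only [PySem.Dict.contains_mk, List.any_append, Bool.or_eq_true, List.mem_cons]
          rw [← PySem.Dict.contains, hS t]
          simp only [List.any_cons, List.any_nil, Bool.or_false, beq_iff_eq]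
          constructor
          · rintro (h | h)
            · exact Or.inr h
            · exact Or.inl h.symm
          · rintro (h | h)
            · exact Or.inr h.symm
            · exact Or.inl h

theorem pvCluster_mem (t : List String) (M : List (Int × List String)) :
    ∀ (c s : PySem.Set Int),
    (∀ x : Int, x ∈ (M.foldl (fun (cs : PySem.Set Int × PySem.Set Int) q =>
        if t = q.2 then (PySem.Set.add cs.1 q.1, PySem.Set.add cs.2 q.1) else cs) (c, s)).1
      ↔ x ∈ c ∨ ∃ q ∈ M, q.2 = t ∧ q.1 = x) ∧
    (∀ x : Int, x ∈ (M.foldl (fun (cs : PySem.Set Int × PySem.Set Int) q =>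
        if t = q.2 then (PySem.Set.add cs.1 q.1, PySem.Set.add cs.2 q.1) else cs) (c, s)).2
      ↔ x ∈ s ∨ ∃ q ∈ M, q.2 = t ∧ q.1 = x) := by
  induction M with
  | nil => intro c s; simp
  | cons q M ih =>
      intro c s
      rw [List.foldl_cons]
      by_cases hq : t = q.2
      · rw [if_pos hq]
        obtain ⟨ih1, ih2⟩ := ih (PySem.Set.add c q.1) (PySem.Set.add s q.1)
        constructor
        · intro x
          rw [ih1 x, PySem.Set.mem_add]
          constructor
          · rintro ((h | h) | ⟨q', hq', h1, h2⟩)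
            · exact Or.inl h
            · exact Or.inr ⟨q, List.mem_cons_self, hq.symm, h.symm⟩
            · exact Or.inr ⟨q', List.mem_cons_of_mem _ hq', h1, h2⟩
          · rintro (h | ⟨q', hq', h1, h2⟩)
            · exact Or.inl (Or.inl h)
            · rcases List.mem_cons.mp hq' with rfl | hq''
              · exact Or.inl (Or.inr h2.symm)
              · exact Or.inr ⟨q', hq'', h1, h2⟩
        · intro x
          rw [ih2 x, PySem.Set.mem_add]
          constructor
          · rintro ((h | h) | ⟨q', hq', h1, h2⟩)
            · exact Or.inl h
            · exact Or.inr ⟨q, List.mem_cons_self, hq.symm, h.symm⟩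
            · exact Or.inr ⟨q', List.mem_cons_of_mem _ hq', h1, h2⟩
          · rintro (h | ⟨q', hq', h1, h2⟩)
            · exact Or.inl (Or.inl h)
            · rcases List.mem_cons.mp hq' with rfl | hq''
              · exact Or.inl (Or.inr h2.symm)
              · exact Or.inr ⟨q', hq'', h1, h2⟩
      · rw [if_neg hq]
        obtain ⟨ih1, ih2⟩ := ih c s
        constructor
        · intro x
          rw [ih1 x]
          constructor
          · rintro (h | ⟨q', hq', h1, h2⟩)
            · exact Or.inl h
            · exact Or.inr ⟨q', List.mem_cons_of_mem _ hq', h1, h2⟩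
          · rintro (h | ⟨q', hq', h1, h2⟩)
            · exact Or.inl h
            · rcases List.mem_cons.mp hq' with rfl | hq''
              · exact absurd h1.symm hq
              · exact Or.inr ⟨q', hq'', h1, h2⟩
        · intro x
          rw [ih2 x]
          constructor
          · rintro (h | ⟨q', hq', h1, h2⟩)
            · exact Or.inl h
            · exact Or.inr ⟨q', List.mem_cons_of_mem _ hq', h1, h2⟩
          · rintro (h | ⟨q', hq', h1, h2⟩)
            · exact Or.inl h
            · rcases List.mem_cons.mp hq' with rfl | hq''
              · exact absurd h1.symm hq
              · exact Or.inr ⟨q', hq'', h1, h2⟩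

theorem pvA_loop_go (L : List (Int × List String)) (hs : L.Pairwise (fun p q => p.1 < q.1)) :
    ∀ (R P : List (Int × List String)) (fused : List (PySem.Set Int)) (seen : PySem.Set Int)
      (S : List (List String)),
    L = P ++ R →
    (∀ t, t ∈ S ↔ t ∈ P.map (fun p => p.2)) →
    (∀ x : Int, x ∈ seen ↔ ∃ q ∈ L, q.1 = x ∧ q.2 ∈ S) →
    ((R.foldl (fun (acc : List (PySem.Set Int) × PySem.Set Int) p =>
        if PySem.Set.contains acc.2 p.1 then acc
        else (acc.1 ++ [(L.foldl (fun (cs : PySem.Set Int × PySem.Set Int) q =>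
                if p.2 = q.2 then (PySem.Set.add cs.1 q.1, PySem.Set.add cs.2 q.1) else cs)
              (PySem.Set.add PySem.Set.empty p.1, PySem.Set.add acc.2 p.1)).1],
            (L.foldl (fun (cs : PySem.Set Int × PySem.Set Int) q =>
                if p.2 = q.2 then (PySem.Set.add cs.1 q.1, PySem.Set.add cs.2 q.1) else cs)
              (PySem.Set.add PySem.Set.empty p.1, PySem.Set.add acc.2 p.1)).2))
      (fused, seen)).1).map (fun c => (PySem.List.min? c (fun x => x)).getD 0)
      = fused.map (fun c => (PySem.List.min? c (fun x => x)).getD 0)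
        ++ (pvDedupSnd S R).map (fun p => p.1) := by
  have hND : (L.map (fun p => p.1)).Nodup :=
    List.Pairwise.map _ (fun a b (h : a.1 < b.1) => Int.ne_of_lt h) hs
  intro R
  induction R with
  | nil => intro P fused seen S hL hS hseen; simp [pvDedupSnd]
  | cons p R' ih =>
      intro P fused seen S hL hS hseen
      have hpL : p ∈ L := by rw [hL]; exact List.mem_append_right _ List.mem_cons_self
      rw [List.foldl_cons]
      simp only []
      by_cases hmem : p.2 ∈ S
      · -- p.1 already seen: skip
        have hin : p.1 ∈ seen := (hseen p.1).mpr ⟨p, hpL, rfl, hmem⟩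
        rw [if_pos (by simpa [PySem.Set.contains, List.contains_iff_mem] using hin)]
        rw [pvDedupSnd, if_pos hmem]
        exact ih (P ++ [p]) fused seen S (by rw [hL, List.append_assoc]; rfl)
          (fun t => by
            rw [hS t]
            simp only [List.map_append, List.mem_append, List.map_cons, List.map_nil,
              List.mem_cons, List.not_mem_nil, or_false]
            constructor
            · exact Or.inl
            · rintro (h | h)
              · exact h
              · exact h ▸ (hS p.2).mp hmem)
          hseen
      · -- new representative
        have hnin : p.1 ∉ seen := by
          intro hx
          obtain ⟨q, hqL, hq1, hq2⟩ := (hseen p.1).mp hx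
          have : q = p := List.inj_on_of_nodup_map hND hqL hpL hq1
          rw [this] at hq2; exact hmem hq2
        rw [if_neg (by simpa [PySem.Set.contains, List.contains_iff_mem] using hnin)]
        obtain ⟨hc1, hc2⟩ := pvCluster_mem p.2 L (PySem.Set.add PySem.Set.empty p.1)
          (PySem.Set.add seen p.1)
        -- membership in the freshly built cluster
        have hcl : ∀ x : Int,
            x ∈ (L.foldl (fun (cs : PySem.Set Int × PySem.Set Int) q =>
                if p.2 = q.2 then (PySem.Set.add cs.1 q.1, PySem.Set.add cs.2 q.1) else cs)
              (PySem.Set.add PySem.Set.empty p.1, PySem.Set.add seen p.1)).1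
            ↔ ∃ q ∈ L, q.2 = p.2 ∧ q.1 = x := by
          intro x
          rw [hc1 x]
          constructor
          · rintro (h | h)
            · have : x = p.1 := by
                simpa [PySem.Set.add, PySem.Set.empty, PySem.Set.contains] using h
              exact ⟨p, hpL, rfl, this.symm⟩
            · exact h
          · exact Or.inr
        -- L decomposes around p
        have hsplit : L.Pairwise (fun a b => a.1 < b.1) := hs
        have hpR' : ∀ q ∈ R', p.1 < q.1 := by
          have := (List.pairwise_append.mp (hL ▸ hs)).2.1
          exact (List.pairwise_cons.mp this).1
        have hPmem : ∀ q ∈ P, q.2 = p.2 → False := by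
          intro q hq hq2
          exact hmem ((hS p.2).mpr (hq2 ▸ List.mem_map_of_mem hq))
        -- min of the cluster is p.1
        have hmin : (PySem.List.min? ((L.foldl (fun (cs : PySem.Set Int × PySem.Set Int) q =>
                if p.2 = q.2 then (PySem.Set.add cs.1 q.1, PySem.Set.add cs.2 q.1) else cs)
              (PySem.Set.add PySem.Set.empty p.1, PySem.Set.add seen p.1)).1) (fun x => x))
            = some p.1 := by
          have hp1 : p.1 ∈ _ := (hcl p.1).mpr ⟨p, hpL, rfl, rfl⟩
          rcases h : PySem.List.min? _ (fun x => x) with _ | m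
          · rw [PySem.List.min?_eq_none_iff] at h
            rw [h] at hp1; exact absurd hp1 (List.not_mem_nil)
          · have hm := PySem.List.min?_mem h
            obtain ⟨q, hqL, hq2, hq1⟩ := (hcl m).mp hm
            have hle : m ≤ p.1 := PySem.List.min?_isMin h p.1 hp1
            have hge : p.1 ≤ m := by
              rw [hL] at hqL
              rcases List.mem_append.mp hqL with hqP | hqpr
              · exact absurd hq2 (fun h2 => hPmem q hqP h2)
              · rcases List.mem_cons.mp hqpr with rfl | hqR'
                · rw [hq1]
                · rw [← hq1]; exact le_of_lt (hpR' q hqR')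
            rw [congrArg some (le_antisymm hle hge)]
        rw [pvDedupSnd, if_neg hmem]
        rw [ih (P ++ [p]) (fused ++ [_]) _ (p.2 :: S) (by rw [hL, List.append_assoc]; rfl)
          ?_ ?_]
        · rw [List.map_append]
          simp only [List.map_cons, List.map_nil]
          rw [hmin]
          simp [List.append_assoc]
        · intro t
          simp only [List.mem_cons, List.map_append, List.mem_append, List.map_cons,
            List.map_nil, List.not_mem_nil, or_false]
          rw [hS t]
          constructor
          · rintro (h | h)
            · exact Or.inr h
            · exact Or.inl h
          · rintro (h | h)
            · exact Or.inr h
            · exact Or.inl h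
        · intro x
          rw [hc2 x]
          constructor
          · rintro (h | h)
            · rw [PySem.Set.mem_add] at h
              rcases h with h | rfl
              · obtain ⟨q, hqL, hq1, hq2⟩ := (hseen x).mp h
                exact ⟨q, hqL, hq1, List.mem_cons_of_mem _ hq2⟩
              · exact ⟨p, hpL, rfl, List.mem_cons_self⟩
            · obtain ⟨q, hqL, hq2, hq1⟩ := h
              exact ⟨q, hqL, hq1, by rw [hq2]; exact List.mem_cons_self⟩
          · rintro ⟨q, hqL, hq1, hq2⟩
            rcases List.mem_cons.mp hq2 with h2 | h2
            · exact Or.inr ⟨q, hqL, h2, hq1⟩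
            · exact Or.inl (by rw [PySem.Set.mem_add]; exact Or.inl ((hseen x).mpr ⟨q, hqL, hq1, h2⟩))

-- ===== VERDICT (by name: the statement is the Claim_ definition above) =====
theorem determine_fused_args_spec : Claim_equal_determine_fused_args := by
  unfold Claim_equal_determine_fused_args
  intro s _
  unfold Spec_determine_fused_args
  rw [determine_fused_args, determine_fused_args_alt]
  simp only []
  rw [pvA_argTypes_items ((PySem.Dict.ofList s).keys), pvW_alt ((PySem.Dict.ofList s).keys),
    PySem.List.pyRange_zero_natCast]
  set keys := (PySem.Dict.ofList s).keys with hk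
  set L := ((List.range (pvW keys)).map (fun (j : Nat) => ((j : Int), pvB_col keys (j : Int)))).filter
      (fun p => PySem.List.slice p.2 (some 1) none ≠ PySem.List.slice p.2 none (some (-1))) with hLdef
  have hs : L.Pairwise (fun p q => p.1 < q.1) := by
    apply List.Pairwise.filter
    exact List.Pairwise.map _ (fun a b h => by dsimp only; exact_mod_cast h) List.pairwise_lt_range
  have hA := pvA_loop_go L hs L [] [] PySem.Set.empty []
    (List.nil_append L).symm (by simp) (by simp [PySem.Set.empty])
  simp only [List.map_nil, List.nil_append] at hA
  have hB : (L.foldl (fun (d : PySem.Dict (List String) Int) p => d.setdefault p.2 p.1)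
        PySem.Dict.empty)
      = ((List.range (pvW keys)).map (fun k => ((k : Nat) : Int))).foldl
          (fun (reps : PySem.Dict (List String) Int) i =>
            if PySem.List.slice (pvB_col keys i) (some 1) none
                ≠ PySem.List.slice (pvB_col keys i) none (some (-1)) then
              reps.setdefault (pvB_col keys i) i
            else reps) PySem.Dict.empty := by
    rw [hLdef, List.foldl_filter, List.foldl_map, List.foldl_map]
    congr 1
    funext d j
    by_cases h : PySem.List.slice (pvB_col keys ((j : Nat) : Int)) (some 1) none
        = PySem.List.slice (pvB_col keys ((j : Nat) : Int)) none (some (-1))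
    · simp [h]
    · simp [h]
  have hBv : (L.foldl (fun (d : PySem.Dict (List String) Int) p => d.setdefault p.2 p.1)
        PySem.Dict.empty).values = (pvDedupSnd [] L).map (fun p => p.1) := by
    rw [PySem.Dict.values, pvB_fold_items L PySem.Dict.empty []
      (by simp [PySem.Dict.empty, PySem.Dict.contains])]
    simp [PySem.Dict.empty, List.map_map, Function.comp]
  rw [hA, ← hB, hBv]
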